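-- pv_equiv track=rewrite | github.com/qk1512/DogRobotics | 2D_LIDAR/planning_path.py | find_largest_gap
-- ===== SOURCE A (Python) =====
-- def find_largest_gap(blocked, fov_bins):
--     """Return (start_bin, end_bin, width_bins). bins are indices in blocked."""
--     if not fov_bins:
--         return None
--     # build list of 0/1 for fov sequence
--     seq = [0 if not blocked[i] else 1 for i in fov_bins]
--     # find longest run of zeros
--     best_len = 0; best_range = None
--     cur_len = 0; cur_start = 0
--     for i, val in enumerate(seq):
--         if val == 0:
--             if cur_len == 0:
--                 cur_start = i
--             cur_len += 1
--         else:
--             if cur_len > best_len: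
--                 best_len = cur_len
--                 best_range = (cur_start, i-1)
--             cur_len = 0
--     # check tail
--     if cur_len > best_len:
--         best_len = cur_len
--         best_range = (cur_start, len(seq)-1)
--     # If no gap found
--     if best_range is None:
--         return None
--     # map back to bin indices
--     s_idx = fov_bins[best_range[0]]
--     e_idx = fov_bins[best_range[1]]
--     return (s_idx, e_idx, best_len)
-- ===== SOURCE B (Python) =====
-- def find_largest_gap(blocked, fov_bins):
--     """Return (start_bin, end_bin, width_bins). bins are indices in blocked."""
--     if not fov_bins:
--         return None
--     n = len(fov_bins)
--     # suffix DP: run[i] = length of the unblocked run starting at offset i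
--     run = [0] * (n + 1)
--     for i in range(n - 1, -1, -1):
--         run[i] = 0 if blocked[fov_bins[i]] else run[i + 1] + 1
--     best = max(range(n), key=run.__getitem__)  # first index on ties
--     width = run[best]
--     if width == 0:
--         return None
--     return (fov_bins[best], fov_bins[best + width - 1], width)
-- ===== Notes on version B (the rewrite author's own statement) =====
-- stated objective: alternative
-- what changed: Replaces A's forward stateful scan (best_len/best_range/cur_len/cur_start plus a tail fix-up) by a suffix dynamic-programming table run[i] = length of the unblocked run starting at offset i, built back-to-front, followed by a first-argmax pass over that table.
import Mathlib
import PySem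

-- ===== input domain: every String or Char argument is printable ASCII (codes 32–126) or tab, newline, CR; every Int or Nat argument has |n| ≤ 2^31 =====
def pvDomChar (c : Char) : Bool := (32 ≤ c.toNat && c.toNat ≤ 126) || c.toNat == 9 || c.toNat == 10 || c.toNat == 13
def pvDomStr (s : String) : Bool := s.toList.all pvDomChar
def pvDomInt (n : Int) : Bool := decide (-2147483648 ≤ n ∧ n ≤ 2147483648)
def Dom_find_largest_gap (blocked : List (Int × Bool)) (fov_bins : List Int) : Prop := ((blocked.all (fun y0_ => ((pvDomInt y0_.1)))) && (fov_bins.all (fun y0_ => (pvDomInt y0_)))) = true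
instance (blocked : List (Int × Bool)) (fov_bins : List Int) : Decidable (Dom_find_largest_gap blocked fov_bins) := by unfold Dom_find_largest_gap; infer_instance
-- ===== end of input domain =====

-- B replaces A's forward stateful scan by a backward suffix-DP table (run length starting at
-- each offset) followed by a first-argmax pass; objective: alternative (same O(n) cost,
-- different algorithmic decomposition). Equivalence is about return values.

-- ===== PORT A =====
-- the for loop over enumerate(seq), state (best_len, best_range, cur_len, cur_start), index i carried explicitly
def pvLoopA (i bL : Int) (bR : Option (Int × Int)) (cL cS : Int) : List Int → Int × Option (Int × Int) × Int × Int
  | [] => (bL, bR, cL, cS)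
  | v :: vs =>
    if v = 0 then
      pvLoopA (i + 1) bL bR (cL + 1) (if cL = 0 then i else cS) vs
    else
      if cL > bL then pvLoopA (i + 1) cL (some (cS, i - 1)) 0 cS vs
      else pvLoopA (i + 1) bL bR 0 cS vs

def find_largest_gap (blocked : List (Int × Bool)) (fov_bins : List Int) : Option (Int × Int × Int) :=
  if fov_bins = [] then none
  else
    -- blocked[i] is a dict lookup; on Pre_ every key is present, so getD false is exact there
    let seq := fov_bins.map (fun i => if ((PySem.Dict.mk blocked).get? i).getD false = false then (0 : Int) else 1)
    let st := pvLoopA 0 0 none 0 0 seq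
    -- tail check
    let p := if st.2.2.1 > st.1 then (st.2.2.1, some (st.2.2.2, (seq.length : Int) - 1)) else (st.1, st.2.1)
    match p.2 with
    | none => none
    | some (s, e) =>
      some ((PySem.List.pyGet? fov_bins s).getD 0, (PySem.List.pyGet? fov_bins e).getD 0, p.1)

-- ===== PORT B =====
-- the backward loop 'for i in range(n-1,-1,-1): run[i] = 0 if blocked[fov_bins[i]] else run[i+1]+1'
-- as structural recursion building run[0..n-1] back-to-front (run[n] = 0 is head?.getD 0 on [])
def pvRunsB : List Bool → List Int
  | [] => []
  | b :: bs => (if b then 0 else ((pvRunsB bs).head?.getD 0) + 1) :: pvRunsB bs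

-- max(range(n), key=run.__getitem__): first index of maximal value, seeded with index 0
def pvArgmaxLoop (i bi bv : Int) : List Int → Int × Int
  | [] => (bi, bv)
  | v :: vs => if v > bv then pvArgmaxLoop (i + 1) i v vs else pvArgmaxLoop (i + 1) bi bv vs

def find_largest_gap_alt (blocked : List (Int × Bool)) (fov_bins : List Int) : Option (Int × Int × Int) :=
  if fov_bins = [] then none
  else
    let run := pvRunsB (fov_bins.map (fun i => ((PySem.Dict.mk blocked).get? i).getD false))
    -- the scan is seeded with index 0 and value run[0] (run is nonempty since fov_bins isn't)
    let q := pvArgmaxLoop 1 0 (run.head?.getD 0) run.tail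
    if q.2 = 0 then none
    else some ((PySem.List.pyGet? fov_bins q.1).getD 0, (PySem.List.pyGet? fov_bins (q.1 + q.2 - 1)).getD 0, q.2)

-- ===== PRECONDITION & SPEC =====
-- Pre_ excludes exactly the inputs where Python A raises KeyError: some fov bin is not a key of blocked
def Pre_find_largest_gap (blocked : List (Int × Bool)) (fov_bins : List Int) : Prop :=
  ∀ i ∈ fov_bins, ((PySem.Dict.mk blocked).get? i).isSome = true
instance (blocked : List (Int × Bool)) (fov_bins : List Int) : Decidable (Pre_find_largest_gap blocked fov_bins) := by unfold Pre_find_largest_gap; infer_instance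
def pvWitness_find_largest_gap : (List (Int × Bool)) × List Int := ([(0, false), (1, true), (2, false)], [0, 1, 2])

def Spec_find_largest_gap (blocked : List (Int × Bool)) (fov_bins : List Int) (out : Option (Int × Int × Int)) : Prop := out = find_largest_gap_alt blocked fov_bins
instance (blocked : List (Int × Bool)) (fov_bins : List Int) (out : Option (Int × Int × Int)) : Decidable (Spec_find_largest_gap blocked fov_bins out) := by unfold Spec_find_largest_gap; infer_instance

-- ===== CLAIM (what is proved, stated in full; the proofs are below) =====
def Claim_equal_find_largest_gap : Prop := ∀ (blocked : List (Int × Bool)) (fov_bins : List Int), Dom_find_largest_gap blocked fov_bins → Pre_find_largest_gap blocked fov_bins → Spec_find_largest_gap blocked fov_bins (find_largest_gap blocked fov_bins)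

-- ===== LEMMAS AND PROOFS =====

-- run decomposition of the 0/1 sequence (proof-only; neither port computes it)
def pvGroupRuns : List Int → List (Int × Nat)
  | [] => []
  | x :: xs =>
    match pvGroupRuns xs with
    | [] => [(x, 1)]
    | (v, n) :: rest => if x = v then (v, n + 1) :: rest else (x, 1) :: (v, n) :: rest

-- reference scan over the runs: best zero-run (first on ties), pos accumulates run lengths
def pvPick (pos : Int) (best : Option (Int × Int)) : List (Int × Nat) → Option (Int × Int)
  | [] => best
  | (v, n) :: rs =>
    let best' :=
      if v = 0 then
        match best with
        | none => some (pos, (n : Int))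
        | some (s, L) => if (n : Int) > L then some (pos, (n : Int)) else some (s, L)
      else best
    pvPick (pos + n) best' rs

def pvInv (bL : Int) (bR : Option (Int × Int)) : Prop :=
  match bR with
  | none => bL = 0
  | some (s, e) => 1 ≤ bL ∧ e = s + bL - 1

def pvToBest (bL : Int) (bR : Option (Int × Int)) : Option (Int × Int) :=
  match bR with
  | none => none
  | some (s, _) => some (s, bL)

def pvTail (st : Int × Option (Int × Int) × Int × Int) (n : Int) : Int × Option (Int × Int) :=
  if st.2.2.1 > st.1 then (st.2.2.1, some (st.2.2.2, n - 1)) else (st.1, st.2.1)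

def pvFlat (runs : List (Int × Nat)) : List Int :=
  (runs.map (fun r => List.replicate r.2 r.1)).flatten

lemma pvInv_nonneg {bL : Int} {bR : Option (Int × Int)} (h : pvInv bL bR) : 0 ≤ bL := by
  cases bR with
  | none => simp [pvInv] at h; omega
  | some p => obtain ⟨s, e⟩ := p; simp [pvInv] at h; omega

lemma pvLoopA_zeros (k : Nat) (t : List Int) (i bL cL cS : Int) (bR : Option (Int × Int))
    (h : 1 ≤ cL) :
    pvLoopA i bL bR cL cS (List.replicate k 0 ++ t) = pvLoopA (i + k) bL bR (cL + k) cS t := by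
  induction k generalizing i cL with
  | zero => simp
  | succ k ih =>
    rw [List.replicate_succ, List.cons_append, pvLoopA, if_pos rfl,
        if_neg (show ¬ cL = 0 by omega)]
    rw [ih _ _ (by omega)]
    rw [show i + 1 + (k : Int) = i + ((k + 1 : Nat) : Int) by omega,
        show cL + 1 + (k : Int) = cL + ((k + 1 : Nat) : Int) by omega]

lemma pvLoopA_ones (m : Nat) (v : Int) (t : List Int) (i bL cS : Int) (bR : Option (Int × Int))
    (hv : v ≠ 0) (hb : 0 ≤ bL) :
    pvLoopA i bL bR 0 cS (List.replicate m v ++ t) = pvLoopA (i + m) bL bR 0 cS t := by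
  induction m generalizing i with
  | zero => simp
  | succ m ih =>
    rw [List.replicate_succ, List.cons_append, pvLoopA]
    simp only [if_neg hv, if_neg (by omega : ¬ (0 : Int) > bL)]
    rw [ih _]
    rw [show i + 1 + (m : Int) = i + ((m + 1 : Nat) : Int) by omega]

lemma pvMain (N : Nat) : ∀ (runs : List (Int × Nat)), runs.length ≤ N →
    (∀ r ∈ runs, 1 ≤ r.2) → List.IsChain (fun a b => a.1 ≠ b.1) runs →
    ∀ (i bL cS : Int) (bR : Option (Int × Int)), pvInv bL bR →
    pvInv (pvTail (pvLoopA i bL bR 0 cS (pvFlat runs)) (i + (pvFlat runs).length)).1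
          (pvTail (pvLoopA i bL bR 0 cS (pvFlat runs)) (i + (pvFlat runs).length)).2 ∧
    pvToBest (pvTail (pvLoopA i bL bR 0 cS (pvFlat runs)) (i + (pvFlat runs).length)).1
             (pvTail (pvLoopA i bL bR 0 cS (pvFlat runs)) (i + (pvFlat runs).length)).2
      = pvPick i (pvToBest bL bR) runs := by
  induction N with
  | zero =>
    intro runs hlen _ _ i bL cS bR hinv
    have : runs = [] := List.eq_nil_of_length_eq_zero (by omega)
    subst this
    have hb := pvInv_nonneg hinv
    refine ⟨?_, ?_⟩ <;>
      simp [pvFlat, pvLoopA, pvTail, pvPick, if_neg (by omega : ¬ (0 : Int) > bL)] <;>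
      exact hinv
  | succ N ih =>
    intro runs hlen hge hch i bL cS bR hinv
    have hb := pvInv_nonneg hinv
    match runs with
    | [] =>
      refine ⟨?_, ?_⟩ <;>
        simp [pvFlat, pvLoopA, pvTail, pvPick, if_neg (by omega : ¬ (0 : Int) > bL)] <;>
        exact hinv
    | (v, n) :: rs =>
      by_cases hv : v = 0
      · subst hv
        have hn : 1 ≤ n := hge (0, n) (by simp)
        -- peel the zero run
        have hflat : pvFlat ((0, n) :: rs) = List.replicate n 0 ++ pvFlat rs := by
          simp [pvFlat]
        have hstep : pvLoopA i bL bR 0 cS (pvFlat ((0, n) :: rs))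
            = pvLoopA (i + n) bL bR n i (pvFlat rs) := by
          rw [hflat]
          have hrep : List.replicate n (0 : Int) = 0 :: List.replicate (n - 1) 0 := by
            conv_lhs => rw [show n = (n - 1) + 1 by omega]
            rw [List.replicate_succ]
          rw [hrep, List.cons_append, pvLoopA, if_pos rfl, if_pos rfl]
          rw [pvLoopA_zeros _ _ _ _ _ _ _ (by omega)]
          rw [show i + 1 + ((n - 1 : Nat) : Int) = i + (n : Int) by omega,
              show (0 : Int) + 1 + ((n - 1 : Nat) : Int) = (n : Int) by omega]
        rw [hstep]
        -- the updated best on the reference side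
        have hbest' : pvPick i (pvToBest bL bR) ((0, n) :: rs)
            = pvPick (i + n)
                (if (n : Int) > bL then some (i, (n : Int)) else pvToBest bL bR) rs := by
          simp only [pvPick, if_pos rfl]
          congr 1
          cases bR with
          | none =>
            have : bL = 0 := by simpa [pvInv] using hinv
            subst this
            simp [pvToBest]
            omega
          | some p =>
            obtain ⟨s, e⟩ := p
            by_cases hgt : (n : Int) > bL <;> simp [pvToBest, hgt]
        rw [hbest']
        match rs, hch with
        | [], _ =>
          have hL : i + (((pvFlat ((0, n) :: ([] : List (Int × Nat)))).length : Nat) : Int)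
              = i + (n : Int) := by
            simp [pvFlat]
          rw [hL]
          have hF : pvFlat ([] : List (Int × Nat)) = [] := by simp [pvFlat]
          rw [hF, pvLoopA, pvPick]
          by_cases hgt : (n : Int) > bL
          · have hT : pvTail (bL, bR, (n : Int), i) (i + (n : Int))
                = ((n : Int), some (i, i + (n : Int) - 1)) := by
              simp [pvTail, hgt]
            rw [hT, if_pos hgt]
            refine ⟨⟨?_, ?_⟩, rfl⟩ <;> simp <;> omega
          · have hT : pvTail (bL, bR, (n : Int), i) (i + (n : Int)) = (bL, bR) := by
              simp only [pvTail, if_neg hgt]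
            rw [hT, if_neg hgt]
            exact ⟨hinv, rfl⟩
        | (w, m) :: rs', hch =>
          have hw : w ≠ 0 := by
            have := (List.isChain_cons_cons.mp hch).1
            simpa using fun h => this h.symm
          have hm : 1 ≤ m := hge (w, m) (by simp)
          have hflat2 : pvFlat ((w, m) :: rs') = List.replicate m w ++ pvFlat rs' := by
            simp [pvFlat]
          -- process the first w, committing; then the rest of the w-run is a no-op
          have hrepw : List.replicate m w = w :: List.replicate (m - 1) w := by
            conv_lhs => rw [show m = (m - 1) + 1 by omega]
            rw [List.replicate_succ]
          by_cases hgt : (n : Int) > bL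
          · have hstep2 : pvLoopA (i + n) bL bR (n : Int) i (pvFlat ((w, m) :: rs'))
                = pvLoopA (i + n + m) (n : Int) (some (i, i + n - 1)) 0 i (pvFlat rs') := by
              rw [hflat2, hrepw, List.cons_append, pvLoopA]
              simp only [if_neg hw, if_pos hgt]
              rw [pvLoopA_ones _ _ _ _ _ _ _ hw (by positivity)]
              rw [show i + (n : Int) + 1 + ((m - 1 : Nat) : Int) = i + (n : Int) + (m : Int) by omega]
            rw [hstep2]
            have hinv2 : pvInv (n : Int) (some (i, i + n - 1)) := by
              constructor
              · exact_mod_cast by omega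
              · ring
            have := ih rs' (by simp at hlen ⊢; omega)
              (fun r hr => hge r (by simp [hr]))
              ((List.isChain_cons_cons.mp hch).2.tail) (i + n + m) (n : Int) i _ hinv2
            have hlens : i + ((pvFlat ((0, n) :: (w, m) :: rs')).length : Int)
                = i + n + m + ((pvFlat rs').length : Int) := by
              simp [pvFlat]; push_cast; ring
            rw [hlens]
            refine ⟨this.1, ?_⟩
            rw [this.2]
            have : pvToBest (n : Int) (some (i, i + n - 1)) = some (i, (n : Int)) := rfl
            rw [this, if_pos hgt]
            simp only [pvPick, if_neg hw]
          · have hstep2 : pvLoopA (i + n) bL bR (n : Int) i (pvFlat ((w, m) :: rs'))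
                = pvLoopA (i + n + m) bL bR 0 i (pvFlat rs') := by
              rw [hflat2, hrepw, List.cons_append, pvLoopA]
              simp only [if_neg hw, if_neg hgt]
              rw [pvLoopA_ones _ _ _ _ _ _ _ hw hb]
              rw [show i + (n : Int) + 1 + ((m - 1 : Nat) : Int) = i + (n : Int) + (m : Int) by omega]
            rw [hstep2]
            have := ih rs' (by simp at hlen ⊢; omega)
              (fun r hr => hge r (by simp [hr]))
              ((List.isChain_cons_cons.mp hch).2.tail) (i + n + m) bL i bR hinv
            have hlens : i + ((pvFlat ((0, n) :: (w, m) :: rs')).length : Int)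
                = i + n + m + ((pvFlat rs').length : Int) := by
              simp [pvFlat]; push_cast; ring
            rw [hlens]
            refine ⟨this.1, ?_⟩
            rw [this.2, if_neg hgt]
            simp only [pvPick, if_neg hw]
      · -- nonzero run: a no-op on both sides
        have hflat : pvFlat ((v, n) :: rs) = List.replicate n v ++ pvFlat rs := by
          simp [pvFlat]
        rw [hflat, pvLoopA_ones _ _ _ _ _ _ _ hv hb]
        have := ih rs (by simp at hlen ⊢; omega)
          (fun r hr => hge r (by simp [hr])) hch.tail (i + n) bL cS bR hinv
        have hlens : i + ((pvFlat ((v, n) :: rs)).length : Int)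
            = i + n + ((pvFlat rs).length : Int) := by
          simp [pvFlat]; push_cast; ring
        rw [hflat] at hlens
        rw [hlens]
        refine ⟨this.1, ?_⟩
        rw [this.2]
        simp only [pvPick, if_neg hv]

lemma pvGroupRuns_flat (xs : List Int) : pvFlat (pvGroupRuns xs) = xs := by
  induction xs with
  | nil => simp [pvGroupRuns, pvFlat]
  | cons x xs ih =>
    rw [pvGroupRuns]
    cases h : pvGroupRuns xs with
    | nil =>
      rw [h] at ih
      simp [pvFlat] at ih ⊢
      exact ih
    | cons r rest =>
      obtain ⟨v, n⟩ := r
      rw [h] at ih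
      by_cases hx : x = v
      · subst hx
        simp only [if_pos rfl]
        simp [pvFlat, List.replicate_succ] at ih ⊢
        exact ih
      · simp only [if_neg hx]
        simp [pvFlat] at ih ⊢
        exact ih

lemma pvGroupRuns_ge (xs : List Int) : ∀ r ∈ pvGroupRuns xs, 1 ≤ r.2 := by
  induction xs with
  | nil => simp [pvGroupRuns]
  | cons x xs ih =>
    rw [pvGroupRuns]
    cases h : pvGroupRuns xs with
    | nil => simp
    | cons r rest =>
      obtain ⟨v, n⟩ := r
      rw [h] at ih
      by_cases hx : x = v
      · subst hx
        simp only [if_pos rfl]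
        intro r hr
        rcases List.mem_cons.mp hr with h1 | h1
        · subst h1; simp
        · exact ih r (by simp [h1])
      · simp only [if_neg hx]
        intro r hr
        rcases List.mem_cons.mp hr with h1 | h1
        · subst h1; simp
        · exact ih r h1

lemma pvGroupRuns_chain (xs : List Int) :
    List.IsChain (fun a b => a.1 ≠ b.1) (pvGroupRuns xs) ∧
    (pvGroupRuns xs).head?.map Prod.fst = xs.head? := by
  induction xs with
  | nil => exact ⟨List.isChain_nil, rfl⟩
  | cons x xs ih =>
    rw [pvGroupRuns]
    cases h : pvGroupRuns xs with
    | nil => exact ⟨List.isChain_singleton _, by simp⟩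
    | cons r rest =>
      obtain ⟨v, n⟩ := r
      rw [h] at ih
      by_cases hx : x = v
      · subst hx
        simp only [if_pos rfl]
        refine ⟨?_, by simp⟩
        rcases List.isChain_cons.mp ih.1 with ⟨hhd, htl⟩
        exact List.isChain_cons.mpr ⟨hhd, htl⟩
      · simp only [if_neg hx]
        refine ⟨?_, by simp⟩
        exact List.isChain_cons.mpr ⟨by simp [hx], ih.1⟩

-- ===== B-side: suffix-DP runs and argmax vs. the run decomposition =====

-- pvRunsB over the Bool flags equals pvRunsZ over the 0/1 sequence
def pvRunsZ : List Int → List Int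
  | [] => []
  | v :: vs => (if v = 0 then ((pvRunsZ vs).head?.getD 0) + 1 else 0) :: pvRunsZ vs

def pvDesc : Nat → List Int
  | 0 => []
  | n + 1 => ((n : Int) + 1) :: pvDesc n

lemma pvRunsB_eq (bs : List Bool) :
    pvRunsB bs = pvRunsZ (bs.map (fun b => if b then (1 : Int) else 0)) := by
  induction bs with
  | nil => rfl
  | cons b bs ih => cases b <;> simp [pvRunsB, pvRunsZ, ih]

lemma pvRunsZ_head_nonneg (s : List Int) : 0 ≤ (pvRunsZ s).head?.getD 0 := by
  cases s with
  | nil => simp [pvRunsZ]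
  | cons v vs =>
    have := pvRunsZ_head_nonneg vs
    by_cases hv : v = 0 <;> simp [pvRunsZ, hv] <;> omega

lemma pvRunsZ_ones (m : Nat) (v : Int) (t : List Int) (hv : v ≠ 0) :
    pvRunsZ (List.replicate m v ++ t) = List.replicate m 0 ++ pvRunsZ t := by
  induction m with
  | zero => simp
  | succ m ih => simp [List.replicate_succ, pvRunsZ, hv, ih]

lemma pvDesc_head (n : Nat) (t : List Int) (h : (pvRunsZ t).head?.getD 0 = 0) :
    ((pvDesc n ++ pvRunsZ t).head?.getD 0) = (n : Int) := by
  cases n with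
  | zero => simpa [pvDesc] using h
  | succ n => simp [pvDesc]

lemma pvRunsZ_zeros (n : Nat) (t : List Int) (h : (pvRunsZ t).head?.getD 0 = 0) :
    pvRunsZ (List.replicate n 0 ++ t) = pvDesc n ++ pvRunsZ t := by
  induction n with
  | zero => simp [pvDesc]
  | succ n ih =>
    rw [List.replicate_succ, List.cons_append, pvRunsZ, ih, if_pos rfl, pvDesc_head n t h]
    simp [pvDesc]

lemma pvDesc_le (n : Nat) : ∀ v ∈ pvDesc n, v ≤ (n : Int) := by
  induction n with
  | zero => simp [pvDesc]
  | succ n ih =>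
    intro v hv
    rcases List.mem_cons.mp hv with h | h
    · omega
    · have := ih v h; push_cast; omega

lemma pvDesc_length (n : Nat) : (pvDesc n).length = n := by
  induction n with
  | zero => rfl
  | succ n ih => simp [pvDesc, ih]

lemma pvArgmaxLoop_skip (l t : List Int) (i bi bv : Int) (h : ∀ v ∈ l, ¬ v > bv) :
    pvArgmaxLoop i bi bv (l ++ t) = pvArgmaxLoop (i + l.length) bi bv t := by
  induction l generalizing i with
  | nil => simp
  | cons x xs ih =>
    rw [List.cons_append, pvArgmaxLoop, if_neg (h x (by simp)), ih _ (fun v hv => h v (by simp [hv]))]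
    congr 1
    simp only [List.length_cons]
    push_cast
    ring

-- relation between the reference best (Option) and the argmax pair (index, value)
def pvRel (best : Option (Int × Int)) (p : Int × Int) : Prop :=
  match best with
  | none => p.2 = 0
  | some (s, L) => p = (s, L) ∧ 1 ≤ L

lemma pvRel_nonneg {best : Option (Int × Int)} {p : Int × Int} (h : pvRel best p) : 0 ≤ p.2 := by
  cases best with
  | none => simp [pvRel] at h; omega
  | some q => obtain ⟨s, L⟩ := q; obtain ⟨h1, h2⟩ := h; subst h1; simpa using by omega

lemma pvArgPick : ∀ (runs : List (Int × Nat)),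
    (∀ r ∈ runs, 1 ≤ r.2) → List.IsChain (fun a b => a.1 ≠ b.1) runs →
    ∀ (i : Int) (best : Option (Int × Int)) (p : Int × Int), pvRel best p →
    pvRel (pvPick i best runs) (pvArgmaxLoop i p.1 p.2 (pvRunsZ (pvFlat runs))) := by
  intro runs
  induction runs with
  | nil =>
    intro _ _ i best p hrel
    simpa [pvFlat, pvRunsZ, pvPick, pvArgmaxLoop] using hrel
  | cons r rs ih =>
    obtain ⟨v, n⟩ := r
    intro hge hch i best p hrel
    have hp2 := pvRel_nonneg hrel
    have hn : 1 ≤ n := hge (v, n) (by simp)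
    have hflat : pvFlat ((v, n) :: rs) = List.replicate n v ++ pvFlat rs := by simp [pvFlat]
    by_cases hv : v = 0
    · subst hv
      -- head of pvRunsZ (pvFlat rs) is 0 (rs empty, or starts with a nonzero run)
      have hhead : (pvRunsZ (pvFlat rs)).head?.getD 0 = 0 := by
        match rs, hch with
        | [], _ => simp [pvFlat, pvRunsZ]
        | (w, m) :: rs', hch =>
          have hw : w ≠ 0 := by
            have := (List.isChain_cons_cons.mp hch).1
            simpa using fun h => this h.symm
          have hm : 1 ≤ m := hge (w, m) (by simp)
          have : pvFlat ((w, m) :: rs') = List.replicate m w ++ pvFlat rs' := by simp [pvFlat]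
          rw [this, pvRunsZ_ones _ _ _ hw]
          have hrep : List.replicate m (0 : Int) = 0 :: List.replicate (m - 1) 0 := by
            conv_lhs => rw [show m = (m - 1) + 1 by omega]
            rw [List.replicate_succ]
          rw [hrep]
          simp
      rw [hflat, pvRunsZ_zeros _ _ hhead]
      have hdesc : pvDesc n = (n : Int) :: pvDesc (n - 1) := by
        conv_lhs => rw [show n = (n - 1) + 1 by omega]
        rw [pvDesc]
        congr 1
        push_cast
        omega
      rw [hdesc, List.cons_append, pvArgmaxLoop]
      by_cases hgt : (n : Int) > p.2
      · rw [if_pos hgt]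
        rw [pvArgmaxLoop_skip _ _ _ _ _ (fun u hu => by
          have := pvDesc_le (n - 1) u hu
          have : u ≤ ((n - 1 : Nat) : Int) := this
          push_cast at this
          omega)]
        rw [pvDesc_length]
        rw [show i + 1 + ((n - 1 : Nat) : Int) = i + (n : Int) by omega]
        have hbest' : pvPick i best ((0, n) :: rs) = pvPick (i + n) (some (i, (n : Int))) rs := by
          cases best with
          | none => simp [pvPick]
          | some q =>
            obtain ⟨s, L⟩ := q
            obtain ⟨h1, h2⟩ := hrel
            have hgt' : (n : Int) > L := by rw [h1] at hgt; exact hgt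
            simp only [pvPick]
            congr 1
            simp [hgt']
        rw [hbest']
        exact ih (fun r hr => hge r (by simp [hr])) hch.tail (i + n) _ (i, (n : Int))
          ⟨rfl, by exact_mod_cast hn⟩
      · rw [if_neg hgt]
        rw [pvArgmaxLoop_skip _ _ _ _ _ (fun u hu => by
          have := pvDesc_le (n - 1) u hu
          have : u ≤ ((n - 1 : Nat) : Int) := this
          push_cast at this
          omega)]
        rw [pvDesc_length]
        rw [show i + 1 + ((n - 1 : Nat) : Int) = i + (n : Int) by omega]
        cases best with
        | none =>
          exfalso
          simp [pvRel] at hrel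
          omega
        | some q =>
          obtain ⟨s, L⟩ := q
          obtain ⟨h1, h2⟩ := hrel
          have hgt' : ¬ (n : Int) > L := by rw [h1] at hgt; exact hgt
          have hbest' : pvPick i (some (s, L)) ((0, n) :: rs) = pvPick (i + n) (some (s, L)) rs := by
            simp only [pvPick]
            congr 1
            simp [hgt']
          rw [hbest']
          exact ih (fun r hr => hge r (by simp [hr])) hch.tail (i + n) _ p ⟨h1, h2⟩
    · -- nonzero run: all run values are 0, no update on either side
      rw [hflat, pvRunsZ_ones _ _ _ hv]
      rw [pvArgmaxLoop_skip _ _ _ _ _ (fun u hu => by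
        have := List.eq_of_mem_replicate hu
        omega)]
      rw [List.length_replicate]
      have hbest' : pvPick i best ((v, n) :: rs) = pvPick (i + n) best rs := by
        simp only [pvPick, if_neg hv]
      rw [hbest']
      exact ih (fun r hr => hge r (by simp [hr])) hch.tail (i + n) best p hrel

-- seeding with the first element equals starting the scan from (0, 0) when r0 ≥ 0
lemma pvArgmax_seed (r0 : Int) (rest : List Int) (h : 0 ≤ r0) :
    pvArgmaxLoop 0 0 0 (r0 :: rest) = pvArgmaxLoop 1 0 r0 rest := by
  rw [pvArgmaxLoop]
  by_cases hgt : r0 > 0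
  · rw [if_pos hgt]; norm_num
  · rw [if_neg hgt]
    have h0 : r0 = 0 := by omega
    rw [h0]; norm_num

-- the two ports read blocked the same way: B's flags mapped to 0/1 give A's seq
lemma pvSeq_flags (blocked : List (Int × Bool)) (fov_bins : List Int) :
    (fov_bins.map (fun i => ((PySem.Dict.mk blocked).get? i).getD false)).map
      (fun b => if b then (1 : Int) else 0)
    = fov_bins.map (fun i => if ((PySem.Dict.mk blocked).get? i).getD false = false then (0 : Int) else 1) := by
  rw [List.map_map]
  apply List.map_congr_left
  intro i _
  cases hgd : ((PySem.Dict.mk blocked).get? i).getD false <;> simp [hgd]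

lemma pvRunsZ_length (s : List Int) : (pvRunsZ s).length = s.length := by
  induction s with
  | nil => rfl
  | cons v vs ih => simp [pvRunsZ, ih]

-- final assembly: A's tail-checked state and B's argmax pair describe the same answer
lemma pvAssemble (fov_bins : List Int) (T : Int × Option (Int × Int)) (w : Int × Int)
    (hInv : pvInv T.1 T.2) (hrel : pvRel (pvToBest T.1 T.2) w) :
    (match T.2 with
     | none => none
     | some (s, e) => some ((PySem.List.pyGet? fov_bins s).getD 0, (PySem.List.pyGet? fov_bins e).getD 0, T.1))
    = (if w.2 = 0 then none
       else some ((PySem.List.pyGet? fov_bins w.1).getD 0,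
                  (PySem.List.pyGet? fov_bins (w.1 + w.2 - 1)).getD 0, w.2)) := by
  obtain ⟨t1, t2⟩ := T
  obtain ⟨w1, w2⟩ := w
  cases t2 with
  | none =>
    have h0 : w2 = 0 := hrel
    simp [h0]
  | some p =>
    obtain ⟨s, e⟩ := p
    have hrel' : (w1, w2) = (s, t1) ∧ 1 ≤ t1 := hrel
    obtain ⟨hp, h1⟩ := hrel'
    have hw1 : w1 = s := by simpa using congrArg Prod.fst hp
    have hw2 : w2 = t1 := by simpa using congrArg Prod.snd hp
    have he : e = s + t1 - 1 := hInv.2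
    simp only [hw1, hw2, he]
    rw [if_neg (by omega)]

-- ===== VERDICT (by name: the statement is the Claim_ definition above) =====
theorem find_largest_gap_spec : Claim_equal_find_largest_gap := by
  intro blocked fov_bins _ _
  unfold Spec_find_largest_gap find_largest_gap find_largest_gap_alt
  by_cases hnil : fov_bins = []
  · simp [hnil]
  · simp only [if_neg hnil]
    set seq := fov_bins.map (fun i => if ((PySem.Dict.mk blocked).get? i).getD false = false then (0 : Int) else 1) with hseq
    -- A side: the scan equals the reference pvPick over the run decomposition
    have hmain := pvMain (pvGroupRuns seq).length (pvGroupRuns seq) le_rfl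
      (pvGroupRuns_ge seq) (pvGroupRuns_chain seq).1 0 0 0 none (by simp [pvInv])
    rw [pvGroupRuns_flat] at hmain
    have hinvT := hmain.1
    have heq := hmain.2
    rw [show pvToBest 0 none = none from rfl] at heq
    set q := pvTail (pvLoopA 0 0 none 0 0 seq) (0 + (seq.length : Int)) with hq
    have hq' : (if (pvLoopA 0 0 none 0 0 seq).2.2.1 > (pvLoopA 0 0 none 0 0 seq).1
        then ((pvLoopA 0 0 none 0 0 seq).2.2.1, some ((pvLoopA 0 0 none 0 0 seq).2.2.2, (seq.length : Int) - 1))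
        else ((pvLoopA 0 0 none 0 0 seq).1, (pvLoopA 0 0 none 0 0 seq).2.1)) = q := by
      rw [hq]
      unfold pvTail
      split_ifs <;> simp
    rw [hq']
    -- B side: its runs list is pvRunsZ seq, and it is nonempty
    have hflags : pvRunsB (fov_bins.map (fun i => ((PySem.Dict.mk blocked).get? i).getD false))
        = pvRunsZ seq := by
      rw [pvRunsB_eq, pvSeq_flags, hseq]
    rw [hflags]
    cases hs : pvRunsZ seq with
    | nil =>
      exfalso
      have : seq.length = 0 := by rw [← pvRunsZ_length, hs]; rfl
      exact hnil (by simpa [hseq] using List.eq_nil_of_length_eq_zero this)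
    | cons r0 rest =>
      simp only [List.head?_cons, Option.getD_some, List.tail_cons]
      -- relate B's argmax to the same pvPick through pvRel
      have hr0 : 0 ≤ r0 := by
        have := pvRunsZ_head_nonneg seq
        rw [hs] at this
        simpa using this
      have hrel0 : pvRel (pvPick 0 none (pvGroupRuns seq))
          (pvArgmaxLoop 1 0 r0 rest) := by
        have h := pvArgPick (pvGroupRuns seq) (pvGroupRuns_ge seq) (pvGroupRuns_chain seq).1
          0 none (0, 0) (by simp [pvRel])
        rw [pvGroupRuns_flat, hs] at h
        rwa [pvArgmax_seed r0 rest hr0] at h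
      rw [← heq] at hrel0
      exact pvAssemble fov_bins q (pvArgmaxLoop 1 0 r0 rest) hinvT hrel0
-- end
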